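-- pv_equiv track=rewrite | github.com/wayne-abarquez/unilab | app/utils/google_places_api.py | get_poi_type
-- ===== SOURCE A (Python) =====
-- place_types_category = [
--     'hospital',
--     'pharmacy',
--     'shopping_mall',
--     'school',
--     'convenience_store'
-- ]
--
-- def get_poi_type(types, place_types_list=None):
--     type = 'establishment'
--
--     type_selection = place_types_category if place_types_list is None else place_types_list
--
--     for place_type in type_selection:
--         for inner_type in types:
--             if place_type == inner_type:
--                 type = place_type
--                 break
--
--     return type
-- ===== SOURCE B (Python) =====
-- place_types_category = [
--     'hospital',
--     'pharmacy',
--     'shopping_mall',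
--     'school',
--     'convenience_store'
-- ]
--
-- def get_poi_type(types, place_types_list=None):
--     type_selection = place_types_category if place_types_list is None else place_types_list
--     rank = {cat: i for i, cat in enumerate(type_selection)}
--     best = -1
--     best_cat = 'establishment'
--     for t in types:
--         i = rank.get(t, -1)
--         if i > best:
--             best = i
--             best_cat = t
--     return best_cat
-- ===== Notes on version B (the rewrite author's own statement) =====
-- stated objective: faster
-- what changed: B builds a rank index (category -> last priority position) once and drives a single max-tracking loop over the input `types`, instead of A's nested loop over the priority list with an inner scan of `types`.
import Mathlib
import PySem

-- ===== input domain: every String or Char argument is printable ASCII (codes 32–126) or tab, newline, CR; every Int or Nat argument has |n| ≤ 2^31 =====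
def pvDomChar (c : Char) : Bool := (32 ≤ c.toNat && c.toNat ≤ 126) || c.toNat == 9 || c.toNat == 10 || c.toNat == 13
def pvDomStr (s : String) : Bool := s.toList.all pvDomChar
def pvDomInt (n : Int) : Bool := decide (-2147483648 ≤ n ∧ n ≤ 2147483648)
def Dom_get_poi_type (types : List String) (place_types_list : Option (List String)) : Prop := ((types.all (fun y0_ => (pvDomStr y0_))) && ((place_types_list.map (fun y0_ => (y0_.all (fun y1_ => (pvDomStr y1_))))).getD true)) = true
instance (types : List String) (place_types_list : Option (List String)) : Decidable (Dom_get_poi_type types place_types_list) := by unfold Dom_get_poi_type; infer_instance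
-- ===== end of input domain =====

-- B replaces A's nested loops by a prebuilt rank index plus one max-tracking pass over `types` (objective: alternative).

def place_types_category : List String :=
  ["hospital", "pharmacy", "shopping_mall", "school", "convenience_store"]

-- ===== PORT A =====
-- inner 'for inner_type in types: if place_type == inner_type: type = place_type; break'
def pvAInner (ty pt : String) : List String → String
  | [] => ty
  | t :: ts => if pt == t then pt else pvAInner ty pt ts

def get_poi_type (types : List String) (place_types_list : Option (List String)) : String :=
  let type0 := "establishment"
  let type_selection := match place_types_list with
    | none => place_types_category
    | some l => l
  type_selection.foldl (fun ty pt => pvAInner ty pt types) type0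

-- ===== PORT B =====
-- rank = {cat: i for i, cat in enumerate(type_selection)}
def pvRank (sel : List String) : PySem.Dict String Int :=
  (PySem.List.enumerate sel).foldl (fun d p => d.insert p.2 p.1) PySem.Dict.empty

def get_poi_type_alt (types : List String) (place_types_list : Option (List String)) : String :=
  let type_selection := match place_types_list with
    | none => place_types_category
    | some l => l
  let rank := pvRank type_selection
  let r := types.foldl (fun (acc : Int × String) t =>
    let i := rank.getD t (-1)
    if i > acc.1 then (i, t) else acc) (-1, "establishment")
  r.2

-- ===== PRECONDITION & SPEC =====
def Spec_get_poi_type (types : List String) (place_types_list : Option (List String)) (out : String) : Prop := out = get_poi_type_alt types place_types_list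
instance (types : List String) (place_types_list : Option (List String)) (out : String) : Decidable (Spec_get_poi_type types place_types_list out) := by unfold Spec_get_poi_type; infer_instance

-- ===== CLAIM (what is proved, stated in full; the proofs are below) =====
def Claim_equal_get_poi_type : Prop := ∀ (types : List String) (place_types_list : Option (List String)), Dom_get_poi_type types place_types_list → Spec_get_poi_type types place_types_list (get_poi_type types place_types_list)

-- ===== LEMMAS AND PROOFS =====

-- A's inner loop returns pt iff pt occurs in types
theorem pvAInner_eq (ty pt : String) (types : List String) :
    pvAInner ty pt types = if types.contains pt then pt else ty := by
  induction types with
  | nil => simp [pvAInner]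
  | cons t ts ih =>
    simp only [pvAInner, List.contains_cons]
    by_cases h : pt = t
    · simp [h]
    · simp [h, ih]

-- the rank dict after appending one more category
theorem pvRank_append (sel : List String) (c : String) :
    pvRank (sel ++ [c]) = (pvRank sel).insert c (sel.length : Int) := by
  simp [pvRank, PySem.List.enumerate_append, List.foldl_append, PySem.List.enumerate]

-- every rank value is ≥ -1 and < sel.length
theorem pvRank_getD_bounds (sel : List String) (t : String) :
    -1 ≤ (pvRank sel).getD t (-1) ∧ (pvRank sel).getD t (-1) < (sel.length : Int) := by
  induction sel using List.reverseRecOn with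
  | nil => simp [pvRank, PySem.List.enumerate, PySem.Dict.getD_empty]
  | append_singleton sel c ih =>
    rw [pvRank_append, PySem.Dict.getD_insert]
    simp only [List.length_append, List.length_cons, List.length_nil]
    split_ifs with h
    · push_cast; omega
    · obtain ⟨h1, h2⟩ := ih
      push_cast
      omega

theorem pvRank_getD_append (sel : List String) (c t : String) :
    (pvRank (sel ++ [c])).getD t (-1) =
      if t = c then (sel.length : Int) else (pvRank sel).getD t (-1) := by
  rw [pvRank_append, PySem.Dict.getD_insert]

-- abstract form of B's loop
def pvBFold (r : String → Int) (acc : Int × String) (l : List String) : Int × String :=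
  l.foldl (fun acc t => if r t > acc.1 then (r t, t) else acc) acc

theorem pvBFold_stay (r : String → Int) (acc : Int × String) (l : List String)
    (h : ∀ t ∈ l, r t ≤ acc.1) : pvBFold r acc l = acc := by
  induction l with
  | nil => rfl
  | cons t ts ih =>
    have ht := h t (by simp)
    simp only [pvBFold, List.foldl_cons]
    rw [if_neg (by omega)]
    exact ih (fun u hu => h u (by simp [hu]))

theorem pvBFold_congr (r r' : String → Int) (acc : Int × String) (l : List String)
    (h : ∀ t ∈ l, r t = r' t) : pvBFold r acc l = pvBFold r' acc l := by
  induction l generalizing acc with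
  | nil => rfl
  | cons t ts ih =>
    simp only [pvBFold, List.foldl_cons] at *
    rw [h t (by simp)]
    exact ih _ (fun u hu => h u (by simp [hu]))

theorem pvBFold_max (r : String → Int) (l : List String) (c : String) (n : Int)
    (hc : c ∈ l) (hrc : r c = n) (hle : ∀ t ∈ l, r t ≤ n)
    (huniq : ∀ t ∈ l, r t = n → t = c) :
    ∀ acc : Int × String, acc.1 < n → pvBFold r acc l = (n, c) := by
  induction l with
  | nil => simp at hc
  | cons t ts ih =>
    intro acc hacc
    rw [show pvBFold r acc (t :: ts) = pvBFold r (if r t > acc.1 then (r t, t) else acc) ts from rfl]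
    by_cases hgt : r t > acc.1
    · rw [if_pos hgt]
      by_cases hn : r t = n
      · have htc : t = c := huniq t (by simp) hn
        subst htc
        rw [hn]
        exact pvBFold_stay r (n, t) ts (fun u hu => hle u (by simp [hu]))
      · have hc' : c ∈ ts := by
          rcases hc with _ | hc
          · exact absurd hrc hn
          · assumption
        exact ih hc' (fun u hu => hle u (by simp [hu]))
          (fun u hu hn' => huniq u (by simp [hu]) hn') (r t, t)
          (by have := hle t (by simp); omega)
    · rw [if_neg hgt]
      have hc' : c ∈ ts := by
        rcases hc with _ | hc
        · exfalso; rw [hrc] at hgt; omega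
        · assumption
      exact ih hc' (fun u hu => hle u (by simp [hu]))
        (fun u hu hn' => huniq u (by simp [hu]) hn') acc hacc

-- the core equivalence, by induction on the selection list from the right
theorem pv_main (types sel : List String) :
    sel.foldl (fun ty pt => pvAInner ty pt types) "establishment" =
      (pvBFold (fun t => (pvRank sel).getD t (-1)) (-1, "establishment") types).2 := by
  induction sel using List.reverseRecOn with
  | nil =>
    rw [pvBFold_stay _ _ _ (fun t _ => by
      simp [pvRank, PySem.List.enumerate, PySem.Dict.getD_empty])]
    rfl
  | append_singleton sel c ih =>
    rw [List.foldl_append]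
    simp only [List.foldl_cons, List.foldl_nil]
    rw [pvAInner_eq]
    by_cases hmem : types.contains c
    · rw [if_pos hmem]
      have hmem' : c ∈ types := by simpa using hmem
      rw [pvBFold_max (fun t => (pvRank (sel ++ [c])).getD t (-1)) types c (sel.length : Int)
        hmem' (by simp [pvRank_getD_append])
        (fun t _ => by
          have := (pvRank_getD_bounds (sel ++ [c]) t).2
          simp only [List.length_append, List.length_cons, List.length_nil] at this
          push_cast at this ⊢
          omega)
        (fun t _ hn => by
          simp only [pvRank_getD_append] at hn
          by_contra htc
          rw [if_neg htc] at hn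
          have := (pvRank_getD_bounds sel t).2
          omega)
        (-1, "establishment") (by push_cast; omega)]
    · rw [if_neg hmem]
      rw [pvBFold_congr _ (fun t => (pvRank sel).getD t (-1)) _ types (fun t ht => by
        rw [pvRank_getD_append, if_neg]
        intro htc
        subst htc
        simp at hmem
        exact hmem ht)]
      exact ih

-- ===== VERDICT (by name: the statement is the Claim_ definition above) =====
theorem get_poi_type_spec : Claim_equal_get_poi_type := by
  intro types place_types_list _
  unfold Spec_get_poi_type get_poi_type get_poi_type_alt
  cases place_types_list <;> exact pv_main _ _
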